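-- pv_equiv track=rewrite | github.com/varvarakoshman/yandex_algorithms_workout_contest | warm-up/CollectorDiego.py | get_diego_unique_map
-- ===== SOURCE A (Python) =====
-- def get_diego_unique_map(diego_stickers):
--     unique_stickers = {0: 1}
--     for i in range(1, len(diego_stickers)):
--         if diego_stickers[i] != diego_stickers[i - 1]:
--             unique_stickers[i] = unique_stickers[i - 1] + 1
--         else:
--             unique_stickers[i] = unique_stickers[i - 1]
--     return unique_stickers
-- ===== SOURCE B (Python) =====
-- from itertools import groupby
--
-- def get_diego_unique_map(diego_stickers):
--     result = {}
--     idx = 0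
--     for run_no, (_, group) in enumerate(groupby(diego_stickers), start=1):
--         for _ in group:
--             result[idx] = run_no
--             idx += 1
--     return result
-- ===== Notes on version B (the rewrite author's own statement) =====
-- stated objective: alternative
-- what changed: A walks indices carrying a running dict and reads back the previous index's count; B instead groups the list into maximal runs of equal adjacent values with itertools.groupby and labels every index of the j-th run with its run number j.
-- intended difference: On the empty list A returns {0: 1} (a count for a nonexistent index 0, an artefact of seeding the dict before the loop); B returns {}, the intended empty map for an empty sticker list. — e.g. on get_diego_unique_map([]): A returns [(0, 1)], B returns []
import Mathlib
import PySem

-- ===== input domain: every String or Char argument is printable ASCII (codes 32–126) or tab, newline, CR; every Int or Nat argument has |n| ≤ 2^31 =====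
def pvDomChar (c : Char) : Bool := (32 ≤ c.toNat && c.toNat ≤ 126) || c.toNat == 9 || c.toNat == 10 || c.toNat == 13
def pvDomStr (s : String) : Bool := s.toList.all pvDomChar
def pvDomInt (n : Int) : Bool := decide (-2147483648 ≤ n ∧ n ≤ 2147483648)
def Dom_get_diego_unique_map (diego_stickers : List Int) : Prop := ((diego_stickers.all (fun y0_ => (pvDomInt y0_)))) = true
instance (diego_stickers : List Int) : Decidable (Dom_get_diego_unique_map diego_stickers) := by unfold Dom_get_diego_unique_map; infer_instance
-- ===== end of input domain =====

-- B (objective: alternative): instead of A's index walk carrying a running dict, B groups the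
-- list into maximal runs of equal adjacent values (itertools.groupby) and labels every index of
-- the j-th run with its run number j; on the empty list B returns {} where A returns {0: 1} (D_).

-- ===== PORT A =====
def get_diego_unique_map (diego_stickers : List Int) : List (Int × Int) :=
  ((PySem.List.pyRange 1 (PySem.List.len diego_stickers) 1).foldl
    (fun d i =>
      if PySem.List.pyGetD diego_stickers i 0 ≠ PySem.List.pyGetD diego_stickers (i - 1) 0 then
        d.insert i (d.getD (i - 1) 0 + 1)
      else
        d.insert i (d.getD (i - 1) 0))
    (PySem.Dict.insert PySem.Dict.empty 0 1)).items

-- ===== PORT B =====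
-- hand port of itertools.groupby restricted to what B consumes: the list of maximal runs of
-- equal adjacent elements, in order (B ignores the group keys); exact on all List Int inputs
def pvGroupRuns : List Int → List (List Int)
  | [] => []
  | [x] => [[x]]
  | x :: y :: t =>
    match pvGroupRuns (y :: t) with
    | [] => [[x]]
    | g :: gs => if x = y then (x :: g) :: gs else [x] :: g :: gs

def get_diego_unique_map_alt (diego_stickers : List Int) : List (Int × Int) :=
  ((PySem.List.enumerate (pvGroupRuns diego_stickers) 1).foldl
    (fun (st : PySem.Dict Int Int × Int) gr =>
      gr.2.foldl (fun st2 _ => (st2.1.insert st2.2 gr.1, st2.2 + 1)) st)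
    (PySem.Dict.empty, 0)).1.items

-- ===== PRECONDITION & SPEC =====
-- On the empty list A returns {0: 1} (a count for a nonexistent index 0, an artefact of seeding
-- the dict before the loop); B returns {}, the intended empty map for an empty sticker list.
def D_get_diego_unique_map (diego_stickers : List Int) : Prop := diego_stickers = []
instance (diego_stickers : List Int) : Decidable (D_get_diego_unique_map diego_stickers) := by unfold D_get_diego_unique_map; infer_instance

def Spec_get_diego_unique_map (diego_stickers : List Int) (out : List (Int × Int)) : Prop := ¬ D_get_diego_unique_map diego_stickers → out = get_diego_unique_map_alt diego_stickers
instance (diego_stickers : List Int) (out : List (Int × Int)) : Decidable (Spec_get_diego_unique_map diego_stickers out) := by unfold Spec_get_diego_unique_map; infer_instance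

def pvDiffWitness_get_diego_unique_map : List Int := []
def pvDiffWitnessOut_get_diego_unique_map : (List (Int × Int)) × (List (Int × Int)) := ([(0, 1)], [])

-- ===== CLAIM (what is proved, stated in full; the proofs are below) =====
def Claim_unchanged_get_diego_unique_map : Prop := ∀ (diego_stickers : List Int), Dom_get_diego_unique_map diego_stickers → Spec_get_diego_unique_map diego_stickers (get_diego_unique_map diego_stickers)
def Claim_changed_get_diego_unique_map : Prop := Dom_get_diego_unique_map (pvDiffWitness_get_diego_unique_map) ∧ D_get_diego_unique_map (pvDiffWitness_get_diego_unique_map) ∧ get_diego_unique_map (pvDiffWitness_get_diego_unique_map) = pvDiffWitnessOut_get_diego_unique_map.1 ∧ get_diego_unique_map_alt (pvDiffWitness_get_diego_unique_map) = pvDiffWitnessOut_get_diego_unique_map.2 ∧ pvDiffWitnessOut_get_diego_unique_map.1 ≠ pvDiffWitnessOut_get_diego_unique_map.2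
def Claim_exact_get_diego_unique_map : Prop := ∀ (diego_stickers : List Int), Dom_get_diego_unique_map diego_stickers → D_get_diego_unique_map diego_stickers → get_diego_unique_map diego_stickers ≠ get_diego_unique_map_alt diego_stickers

-- ===== LEMMAS AND PROOFS =====

-- the running count at index k (the common reference both ports are reduced to)
def pvC (xs : List Int) : Nat → Int
  | 0 => 1
  | k + 1 => pvC xs k +
      (if PySem.List.pyGetD xs ((k : Int) + 1) 0 ≠ PySem.List.pyGetD xs ((k : Int) + 1 - 1) 0 then 1 else 0)

theorem pvC_succ (xs : List Int) (k : Nat) :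
    pvC xs (k + 1) = pvC xs k + (if xs.getD (k + 1) 0 ≠ xs.getD k 0 then 1 else 0) := by
  have h1 : ((k : Int) + 1) = ((k + 1 : Nat) : Int) := by push_cast; ring
  have h2 : (((k + 1 : Nat) : Int) - 1) = ((k : Nat) : Int) := by push_cast; ring
  rw [show pvC xs (k + 1) = pvC xs k +
      (if PySem.List.pyGetD xs ((k : Int) + 1) 0 ≠ PySem.List.pyGetD xs ((k : Int) + 1 - 1) 0 then 1 else 0) from rfl,
    h1, h2, PySem.List.pyGetD_natCast, PySem.List.pyGetD_natCast]

theorem pvC_cons (x : Int) (t : List Int) (k : Nat) :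
    pvC (x :: t) (k + 1) = (if t.getD 0 0 ≠ x then 1 else 0) + pvC t k := by
  induction k with
  | zero =>
    rw [pvC_succ]
    simp only [List.getD_cons_succ, List.getD_cons_zero]
    show 1 + _ = _ + pvC t 0
    show 1 + _ = _ + 1
    ring
  | succ k ih =>
    rw [pvC_succ, ih, pvC_succ]
    simp only [List.getD_cons_succ]
    ring

def pvTable (xs : List Int) : List Int := (List.range xs.length).map (pvC xs)

theorem pvTable_cons (x : Int) (t : List Int) :
    pvTable (x :: t) = 1 :: (pvTable t).map (fun c => (if t.getD 0 0 ≠ x then 1 else 0) + c) := by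
  unfold pvTable
  rw [List.length_cons, List.range_succ_eq_map, List.map_cons, List.map_map, List.map_map]
  congr 1
  apply List.map_congr_left
  intro k _
  exact pvC_cons x t k

-- the list of counts B's nested loops write your way through: run j contributes |run j| copies of j
def pvExpand (r : Int) : List (List Int) → List Int
  | [] => []
  | g :: gs => List.replicate g.length r ++ pvExpand (r + 1) gs

theorem pvExpand_shift (gs : List (List Int)) : ∀ (r : Int),
    pvExpand (r + 1) gs = (pvExpand r gs).map (fun c => c + 1) := by
  induction gs with
  | nil => intro r; simp [pvExpand]
  | cons g gs ih =>
    intro r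
    simp only [pvExpand, List.map_append, List.map_replicate, ih (r + 1)]

theorem pvGroupRuns_ne_nil (y : Int) (t : List Int) : pvGroupRuns (y :: t) ≠ [] := by
  cases t with
  | nil => simp [pvGroupRuns]
  | cons z t' =>
    unfold pvGroupRuns
    cases h : pvGroupRuns (z :: t') with
    | nil => simp
    | cons g gs => by_cases hy : y = z <;> simp [hy]

-- the main bridge: A's count table is B's run-number expansion (nonempty input)
theorem pvTable_eq_expand (t : List Int) : ∀ (x : Int),
    pvTable (x :: t) = pvExpand 1 (pvGroupRuns (x :: t)) := by
  induction t with
  | nil =>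
    intro x
    simp [pvTable, pvGroupRuns, pvExpand, pvC]
  | cons y t' ih =>
    intro x
    rw [pvTable_cons]
    obtain ⟨g, gs, hruns⟩ : ∃ g gs, pvGroupRuns (y :: t') = g :: gs := by
      cases h : pvGroupRuns (y :: t') with
      | nil => exact absurd h (pvGroupRuns_ne_nil y t')
      | cons g gs => exact ⟨g, gs, rfl⟩
    have hstep : pvGroupRuns (x :: y :: t') =
        if x = y then (x :: g) :: gs else [x] :: g :: gs := by
      unfold pvGroupRuns
      rw [hruns]
    by_cases hxy : x = y
    · have hδ : (if (y :: t').getD 0 0 ≠ x then (1 : Int) else 0) = 0 := by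
        simp [hxy]
      rw [hδ]
      simp only [zero_add, List.map_id']
      rw [ih y, hruns, hstep, if_pos hxy]
      simp only [pvExpand, List.length_cons, List.replicate_succ, List.cons_append]
    · have hδ : (if (y :: t').getD 0 0 ≠ x then (1 : Int) else 0) = 1 := by
        simp [Ne.symm hxy]
      rw [hδ, hstep, if_neg hxy]
      show 1 :: (pvTable (y :: t')).map (fun c => 1 + c) =
        pvExpand 1 ([x] :: g :: gs)
      rw [ih y, hruns]
      simp only [pvExpand, List.length_cons, List.length_nil, List.replicate_succ,
        List.replicate_zero, List.cons_append, List.nil_append]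
      have hs : pvExpand (1 + 1 + 1) gs = (pvExpand (1 + 1) gs).map (fun c => 1 + c) := by
        rw [pvExpand_shift]
        apply List.map_congr_left
        intro c _
        ring
      rw [hs, List.map_append, List.map_replicate]

-- ===== A side: the dict-building loop produces the enumerated count table =====
theorem pvA_fold (xs : List Int) (m : Nat) :
    (PySem.List.pyRange 1 ((m : Int) + 1) 1).foldl
      (fun d i =>
        if PySem.List.pyGetD xs i 0 ≠ PySem.List.pyGetD xs (i - 1) 0 then
          d.insert i (d.getD (i - 1) 0 + 1)
        else
          d.insert i (d.getD (i - 1) 0))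
      (PySem.Dict.insert PySem.Dict.empty 0 1)
    = PySem.Dict.mk (PySem.List.enumerate ((List.range (m + 1)).map (pvC xs)) 0) := by
  induction m with
  | zero =>
    rw [PySem.List.pyRange_one_eq_nil (by norm_num)]
    rfl
  | succ m ih =>
    have hsplit : PySem.List.pyRange 1 ((↑(m + 1) : Int) + 1) 1
        = PySem.List.pyRange 1 ((m : Int) + 1) 1 ++ [(m : Int) + 1] := by
      have := PySem.List.pyRange_one_succ_right (a := 1) (b := (m : Int) + 1) (by omega)
      push_cast
      rw [this]
    rw [hsplit, List.foldl_append, ih]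
    set E := PySem.List.enumerate ((List.range (m + 1)).map (pvC xs)) 0 with hE
    have hnodup : (PySem.Dict.mk E).keys.Nodup := by
      show (E.map Prod.fst).Nodup
      rw [hE, PySem.List.map_fst_enumerate]
      exact PySem.List.nodup_pyRange_one _ _
    have hmem : ((m : Int), pvC xs m) ∈ E := by
      rw [hE, PySem.List.mem_enumerate_iff]
      refine ⟨m, by simp, ?_⟩
      simp
    have hgetD : (PySem.Dict.mk E).getD ((m : Int) + 1 - 1) 0 = pvC xs m := by
      have h1 : ((m : Int) + 1 - 1) = (m : Int) := by ring
      rw [h1]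
      exact PySem.Dict.getD_of_mem_items _ hmem hnodup 0
    have hnc : (PySem.Dict.mk E).contains ((m : Int) + 1) = false := by
      rw [PySem.Dict.contains_eq_decide_mem_keys]
      simp only [decide_eq_false_iff_not]
      show ((m : Int) + 1) ∉ E.map Prod.fst
      rw [hE, PySem.List.map_fst_enumerate, PySem.List.mem_pyRange_one]
      simp
    have hEsucc : PySem.List.enumerate ((List.range (m + 1 + 1)).map (pvC xs)) 0
        = E ++ [((m : Int) + 1, pvC xs (m + 1))] := by
      rw [List.range_succ (n := m + 1), List.map_append, PySem.List.enumerate_append, hE]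
      simp [PySem.List.enumerate]
    simp only [List.foldl_cons, List.foldl_nil]
    rw [hgetD, hEsucc]
    split_ifs with h
    · apply PySem.Dict.ext
      rw [PySem.Dict.items_insert_of_not_contains _ _ (h := hnc)]
      have hc : pvC xs (m + 1) = pvC xs m + 1 := by simp only [pvC, if_pos h]
      rw [hc]
    · apply PySem.Dict.ext
      rw [PySem.Dict.items_insert_of_not_contains _ _ (h := hnc)]
      have hc : pvC xs (m + 1) = pvC xs m := by simp only [pvC, if_neg h, add_zero]
      rw [hc]

-- ===== B side: the nested loops over runs enumerate the expansion =====
theorem pvB_inner (g : List Int) : ∀ (r : Int) (acc : List Int),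
    g.foldl (fun st2 _ => (st2.1.insert st2.2 r, st2.2 + 1))
      ((PySem.Dict.mk (PySem.List.enumerate acc 0) : PySem.Dict Int Int), (acc.length : Int))
    = (PySem.Dict.mk (PySem.List.enumerate (acc ++ List.replicate g.length r) 0),
        ((acc.length + g.length : Nat) : Int)) := by
  induction g with
  | nil => intro r acc; simp
  | cons a g ih =>
    intro r acc
    have hnc : (PySem.Dict.mk (PySem.List.enumerate acc 0) : PySem.Dict Int Int).contains
        ((acc.length : Nat) : Int) = false := by
      rw [PySem.Dict.contains_eq_decide_mem_keys]
      simp only [decide_eq_false_iff_not]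
      show ((acc.length : Nat) : Int) ∉ (PySem.List.enumerate acc 0).map Prod.fst
      rw [PySem.List.map_fst_enumerate, PySem.List.mem_pyRange_one]
      simp
    have hins : (PySem.Dict.mk (PySem.List.enumerate acc 0) : PySem.Dict Int Int).insert
        ((acc.length : Nat) : Int) r = PySem.Dict.mk (PySem.List.enumerate (acc ++ [r]) 0) := by
      apply PySem.Dict.ext
      rw [PySem.Dict.items_insert_of_not_contains _ _ (h := hnc)]
      rw [PySem.List.enumerate_append]
      simp [PySem.List.enumerate]
    simp only [List.foldl_cons]
    rw [hins]
    have hlen : ((acc.length : Nat) : Int) + 1 = ((acc ++ [r]).length : Int) := by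
      simp
    rw [hlen, ih r (acc ++ [r])]
    have e1 : acc ++ [r] ++ List.replicate g.length r = acc ++ List.replicate (a :: g).length r := by
      rw [List.append_assoc, List.singleton_append, ← List.replicate_succ, List.length_cons]
    have e2 : ((acc ++ [r]).length + g.length : Nat) = acc.length + (a :: g).length := by
      simp only [List.length_append, List.length_cons, List.length_nil]
      omega
    rw [e1, e2]

theorem pvB_fold (gs : List (List Int)) : ∀ (r : Int) (acc : List Int),
    (PySem.List.enumerate gs r).foldl
      (fun (st : PySem.Dict Int Int × Int) gr =>
        gr.2.foldl (fun st2 _ => (st2.1.insert st2.2 gr.1, st2.2 + 1)) st)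
      (PySem.Dict.mk (PySem.List.enumerate acc 0), (acc.length : Int))
    = (PySem.Dict.mk (PySem.List.enumerate (acc ++ pvExpand r gs) 0),
        ((acc ++ pvExpand r gs).length : Int)) := by
  induction gs with
  | nil => intro r acc; simp [PySem.List.enumerate, pvExpand]
  | cons g gs ih =>
    intro r acc
    rw [PySem.List.enumerate_cons]
    simp only [List.foldl_cons]
    rw [pvB_inner g r acc]
    have hlen : ((acc.length + g.length : Nat) : Int)
        = (((acc ++ List.replicate g.length r).length : Nat) : Int) := by simp
    rw [hlen, ih (r + 1) (acc ++ List.replicate g.length r)]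
    simp [pvExpand, List.append_assoc]

theorem pvB_items (xs : List Int) :
    get_diego_unique_map_alt xs = PySem.List.enumerate (pvExpand 1 (pvGroupRuns xs)) 0 := by
  unfold get_diego_unique_map_alt
  have h := pvB_fold (pvGroupRuns xs) 1 []
  simp only [List.nil_append] at h
  rw [show ((PySem.Dict.empty : PySem.Dict Int Int), (0 : Int))
      = ((PySem.Dict.mk (PySem.List.enumerate ([] : List Int) 0) : PySem.Dict Int Int),
         ((([] : List Int).length : Nat) : Int)) from rfl, h]

-- ===== VERDICT (by name: the statement is the Claim_ definitions above) =====
theorem get_diego_unique_map_spec : Claim_unchanged_get_diego_unique_map := by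
  intro xs _ hD
  cases xs with
  | nil => exact absurd (show D_get_diego_unique_map [] from rfl) hD
  | cons x t =>
    unfold get_diego_unique_map
    have hlen : (PySem.List.len (x :: t) : Int) = ((t.length : Int)) + 1 := by
      simp [PySem.List.len_eq]
    rw [hlen, pvA_fold (x :: t) t.length, pvB_items]
    have : (List.range (t.length + 1)).map (pvC (x :: t)) = pvExpand 1 (pvGroupRuns (x :: t)) := by
      have := pvTable_eq_expand t x
      unfold pvTable at this
      simpa using this
    rw [this]

theorem get_diego_unique_map_changed : Claim_changed_get_diego_unique_map := by
  unfold Claim_changed_get_diego_unique_map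
  decide

theorem get_diego_unique_map_tight : Claim_exact_get_diego_unique_map := by
  intro xs _ hD
  subst hD
  decide
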